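-- pv_equiv track=rewrite | github.com/Oviyah18/SoftwareAssessmentCFG | Task2.1.py | unique_consonants
-- ===== SOURCE A (Python) =====
-- def unique_consonants(input_string):
--     consonants = "bcdfghjklmnpqrstvwxyzBCDFGHJKLMNPQRSTVWXYZ"
--     consonant_count = {}
--     unique_count = 0
--
--     for char in input_string:
--         if char in consonants:
--             if char.lower() in consonant_count:
--                 consonant_count[char.lower()] += 1
--             else:
--                 consonant_count[char.lower()] = 1
--
--     for count in consonant_count.values():
--         if count == 1:
--             unique_count += 1
--
--     return unique_count
-- ===== SOURCE B (Python) =====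
-- def unique_consonants(input_string):
--     consonants = "bcdfghjklmnpqrstvwxyzBCDFGHJKLMNPQRSTVWXYZ"
--     seen_once = set()
--     seen_more = set()
--
--     for char in input_string:
--         if char in consonants:
--             key = char.lower()
--             if key in seen_more:
--                 continue
--             if key in seen_once:
--                 seen_once.remove(key)
--                 seen_more.add(key)
--             else:
--                 seen_once.add(key)
--
--     return len(seen_once)
-- ===== Notes on version B (the rewrite author's own statement) =====
-- stated objective: faster
-- what changed: A builds a lowercase-keyed count dict in one pass and then makes a second pass over the values counting 1s; B makes a single pass maintaining two sets (seen-once / seen-more) and returns the size of the seen-once set, with no counts kept and no second pass.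
import Mathlib
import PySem

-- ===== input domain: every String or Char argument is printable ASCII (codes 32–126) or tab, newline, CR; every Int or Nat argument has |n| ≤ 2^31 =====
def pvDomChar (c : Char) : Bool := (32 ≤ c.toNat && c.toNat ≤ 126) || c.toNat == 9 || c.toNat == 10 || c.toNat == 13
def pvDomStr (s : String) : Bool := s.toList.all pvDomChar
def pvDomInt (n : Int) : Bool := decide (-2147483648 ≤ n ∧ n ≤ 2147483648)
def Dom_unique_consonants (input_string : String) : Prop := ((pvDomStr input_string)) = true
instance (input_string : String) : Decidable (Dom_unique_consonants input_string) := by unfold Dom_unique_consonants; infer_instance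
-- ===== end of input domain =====

-- B replaces A's count-dict plus second pass over the values by a single pass keeping two
-- sets (seen once / seen more than once) and returning the size of the first (objective:
-- faster by a constant factor: no per-character counter updates and no second pass).

-- ===== PORT A =====
-- the shared constant string of consonants (both cases); 'char in consonants' on a
-- one-character char is exactly list membership of that char
def pvConsonants : List Char := "bcdfghjklmnpqrstvwxyzBCDFGHJKLMNPQRSTVWXYZ".toList

-- the body of A's first loop ('char.lower()' on the one-char key is Chars.lowerChar;
-- the '+= 1' branch runs only when the key is present, so modify's default 0 is unused)
def pvStepA (d : PySem.Dict Char Int) (c : Char) : PySem.Dict Char Int :=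
  if pvConsonants.contains c then
    if d.contains (PySem.Chars.lowerChar c) then
      d.modify (PySem.Chars.lowerChar c) 0 (· + 1)
    else
      d.insert (PySem.Chars.lowerChar c) 1
  else d

def unique_consonants (input_string : String) : Int :=
  let consonant_count := input_string.toList.foldl pvStepA PySem.Dict.empty
  consonant_count.values.foldl (fun acc count => if count == 1 then acc + 1 else acc) 0

-- ===== PORT B =====
-- the body of B's single loop: state = (seen_once, seen_more); 'remove' on a member
-- equals Set.discard (the membership test just above guarantees the key is present)
def pvStepB (st : PySem.Set Char × PySem.Set Char) (c : Char) :
    PySem.Set Char × PySem.Set Char :=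
  if pvConsonants.contains c then
    let key := PySem.Chars.lowerChar c
    if PySem.Set.contains st.2 key then st
    else if PySem.Set.contains st.1 key then
      (PySem.Set.discard st.1 key, PySem.Set.add st.2 key)
    else
      (PySem.Set.add st.1 key, st.2)
  else st

def unique_consonants_alt (input_string : String) : Int :=
  let st := input_string.toList.foldl pvStepB (PySem.Set.empty, PySem.Set.empty)
  PySem.Set.len st.1

-- ===== PRECONDITION & SPEC =====
def Spec_unique_consonants (input_string : String) (out : Int) : Prop := out = unique_consonants_alt input_string
instance (input_string : String) (out : Int) : Decidable (Spec_unique_consonants input_string out) := by unfold Spec_unique_consonants; infer_instance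

-- ===== CLAIM (what is proved, stated in full; the proofs are below) =====
def Claim_equal_unique_consonants : Prop := ∀ (input_string : String), Dom_unique_consonants input_string → Spec_unique_consonants input_string (unique_consonants input_string)

-- ===== LEMMAS AND PROOFS =====

-- The coupling invariant between A's dict and B's pair of sets:
-- seen_once is exactly the keys whose count is 1, in insertion order;
-- seen_more holds exactly the keys whose count is ≠ 1; keys unique, counts ≥ 1.
def pvInv (d : PySem.Dict Char Int) (st : PySem.Set Char × PySem.Set Char) : Prop :=
  st.1 = (d.items.filter (fun q => q.2 == 1)).map Prod.fst ∧
  (∀ k : Char, k ∈ st.2 ↔ ∃ v : Int, (k, v) ∈ d.items ∧ v ≠ 1) ∧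
  d.keys.Nodup ∧
  (∀ q ∈ d.items, (1 : Int) ≤ q.2)

-- the overwriting function of Dict.items_insert_of_contains, in propositional-if form
lemma pv_overwrite_fun (k : Char) (w : Int) :
    (fun q : Char × Int => if (q.1 == k) = true then (k, w) else q)
      = (fun q : Char × Int => if q.1 = k then (k, w) else q) := by
  funext q; simp

-- membership in the item list after an in-place overwrite of key k
lemma pv_mem_map_overwrite (l : List (Char × Int)) (k : Char) (w : Int) (k' : Char) (v : Int) :
    (k', v) ∈ l.map (fun q => if q.1 = k then (k, w) else q) ↔
      (k' ≠ k ∧ (k', v) ∈ l) ∨ (k' = k ∧ v = w ∧ ∃ u : Int, (k, u) ∈ l) := by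
  induction l with
  | nil => simp
  | cons q l ih =>
    obtain ⟨a, b⟩ := q
    by_cases ha : a = k <;>
      simp only [List.map_cons, List.mem_cons, ih, if_pos, ha, Prod.mk.injEq] <;>
      aesop

-- the once-list after an overwrite with a value w ≠ 1: the key k is filtered out
lemma pv_once_overwrite (l : List (Char × Int)) (k : Char) (w : Int) (hw : w ≠ 1) :
    ((l.map (fun q => if q.1 = k then (k, w) else q)).filter
        (fun q => q.2 == 1)).map Prod.fst
      = ((l.filter (fun q => q.2 == 1)).map Prod.fst).filter (fun a => !(a == k)) := by
  induction l with
  | nil => simp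
  | cons q l ih =>
    obtain ⟨a, b⟩ := q
    by_cases ha : a = k
    · subst ha
      by_cases hb : b = 1 <;> simp [hw, hb, ih]
    · by_cases hb : b = 1 <;> simp [ha, hb, ih]

-- the once-list is untouched when the overwritten key already had a value ≠ 1
lemma pv_once_overwrite_ne (l : List (Char × Int)) (k : Char) (w : Int) (hw : w ≠ 1)
    (hk : ∀ u : Int, (k, u) ∈ l → u ≠ 1) :
    ((l.map (fun q => if q.1 = k then (k, w) else q)).filter
        (fun q => q.2 == 1)).map Prod.fst
      = ((l.filter (fun q => q.2 == 1)).map Prod.fst) := by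
  induction l with
  | nil => simp
  | cons q l ih =>
    obtain ⟨a, b⟩ := q
    have ih' := ih (fun u hu => hk u (List.mem_cons_of_mem _ hu))
    by_cases ha : a = k
    · subst ha
      have hb : b ≠ 1 := hk b (List.mem_cons_self ..)
      simp [hw, hb, ih']
    · by_cases hb : b = 1 <;> simp [ha, hb, ih']

-- every value stored with key k in a key-nodup dict is the looked-up value
lemma pv_val_of_mem (d : PySem.Dict Char Int) {k : Char} {v u : Int}
    (hnd : d.keys.Nodup) (hv : d.get? k = some v) (hu : (k, u) ∈ d.items) : u = v := by
  have h := PySem.Dict.get?_of_mem_items d hu hnd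
  rw [hv] at h
  exact (Option.some_inj.mp h).symm

-- one step preserves the invariant
lemma pv_step (d : PySem.Dict Char Int) (st : PySem.Set Char × PySem.Set Char) (c : Char)
    (h : pvInv d st) : pvInv (pvStepA d c) (pvStepB st c) := by
  obtain ⟨h1, h2, h3, h4⟩ := h
  by_cases hcons : pvConsonants.contains c = true
  · set k := PySem.Chars.lowerChar c with hk
    by_cases hc : d.contains k = true
    · -- the key is already counted
      obtain ⟨v0, hv0⟩ : ∃ v0, d.get? k = some v0 := by
        have h := PySem.Dict.contains_eq_isSome_get? d k
        rw [hc] at h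
        exact Option.isSome_iff_exists.mp h.symm
      have hmem : (k, v0) ∈ d.items := PySem.Dict.mem_items_of_get?_eq_some d hv0
      have hv0ge : (1 : Int) ≤ v0 := h4 _ hmem
      have hgetD : d.getD k 0 = v0 := PySem.Dict.getD_of_get?_eq_some d 0 hv0
      have hstepA : pvStepA d c = d.insert k (v0 + 1) := by
        unfold pvStepA
        rw [← hk, if_pos hcons, if_pos hc]
        simp only [PySem.Dict.modify]
        rw [hgetD]
      have hitems : (d.insert k (v0 + 1)).items
          = d.items.map (fun q => if q.1 = k then (k, v0 + 1) else q) := by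
        rw [PySem.Dict.items_insert_of_contains d _ hc, pv_overwrite_fun]
      have hw : v0 + 1 ≠ 1 := by omega
      have hbound : ∀ q ∈ (d.insert k (v0 + 1)).items, (1 : Int) ≤ q.2 := by
        intro q hq
        rw [hitems] at hq
        rcases (pv_mem_map_overwrite d.items k (v0 + 1) q.1 q.2).mp hq with
          ⟨_, hm⟩ | ⟨_, hvw, _⟩
        · exact h4 _ hm
        · omega
      by_cases hv1 : v0 = 1
      · -- count goes 1 → 2 : B moves k from seen_once to seen_more
        have hkonce : k ∈ st.1 := by
          rw [h1]
          exact List.mem_map.mpr ⟨(k, v0), List.mem_filter.mpr ⟨hmem, by simp [hv1]⟩, rfl⟩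
        have hkmore : k ∉ st.2 := by
          intro hkm
          obtain ⟨v, hvmem, hvne⟩ := (h2 k).mp hkm
          exact hvne (hv1 ▸ pv_val_of_mem d h3 hv0 hvmem)
        have hc2 : PySem.Set.contains st.2 k = false := by
          simp [hkmore]
        have hc1 : PySem.Set.contains st.1 k = true :=
          (PySem.Set.contains_iff st.1 k).mpr hkonce
        have hstepB : pvStepB st c = (PySem.Set.discard st.1 k, PySem.Set.add st.2 k) := by
          unfold pvStepB
          rw [← hk, if_pos hcons]
          simp only [hc2, hc1]
          simp
        rw [hstepA, hstepB]
        refine ⟨?_, ?_, PySem.Dict.nodup_keys_insert d k _ h3, hbound⟩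
        · simp only [hitems, pv_once_overwrite d.items k (v0 + 1) hw, PySem.Set.discard, ← h1]
        · intro k'
          simp only [PySem.Set.mem_add, h2, hitems]
          constructor
          · rintro (⟨v, hvm, hvne⟩ | rfl)
            · have hne : k' ≠ k := by
                rintro rfl
                exact hvne (hv1 ▸ pv_val_of_mem d h3 hv0 hvm)
              exact ⟨v, (pv_mem_map_overwrite ..).mpr (Or.inl ⟨hne, hvm⟩), hvne⟩
            · exact ⟨v0 + 1, (pv_mem_map_overwrite ..).mpr (Or.inr ⟨rfl, rfl, v0, hmem⟩), hw⟩
          · rintro ⟨v, hvm, hvne⟩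
            rcases (pv_mem_map_overwrite ..).mp hvm with ⟨hne, hvm'⟩ | ⟨rfl, _, _⟩
            · exact Or.inl ⟨v, hvm', hvne⟩
            · exact Or.inr rfl
      · -- count was already ≥ 2 : B leaves both sets alone
        have hkmore : k ∈ st.2 := (h2 k).mpr ⟨v0, hmem, hv1⟩
        have hstepB : pvStepB st c = st := by
          unfold pvStepB
          rw [← hk, if_pos hcons]
          simp only [(PySem.Set.contains_iff st.2 k).mpr hkmore]
          simp
        rw [hstepA, hstepB]
        refine ⟨?_, ?_, PySem.Dict.nodup_keys_insert d k _ h3, hbound⟩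
        · rw [hitems, pv_once_overwrite_ne d.items k (v0 + 1) hw
            (fun u hu => by have h := pv_val_of_mem d h3 hv0 hu; omega), h1]
        · intro k'
          simp only [h2, hitems]
          constructor
          · rintro ⟨v, hvm, hvne⟩
            by_cases hne : k' = k
            · subst hne
              exact ⟨v0 + 1, (pv_mem_map_overwrite ..).mpr (Or.inr ⟨rfl, rfl, v0, hmem⟩), hw⟩
            · exact ⟨v, (pv_mem_map_overwrite ..).mpr (Or.inl ⟨hne, hvm⟩), hvne⟩
          · rintro ⟨v, hvm, hvne⟩
            rcases (pv_mem_map_overwrite ..).mp hvm with ⟨hne, hvm'⟩ | ⟨rfl, _, _⟩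
            · exact ⟨v, hvm', hvne⟩
            · exact ⟨v0, hmem, hv1⟩
    · -- fresh key : A appends (k, 1), B appends k to seen_once
      have hknotkeys : k ∉ d.keys := fun hm =>
        hc ((PySem.Dict.contains_iff_mem_keys d k).mpr hm)
      have hkonce : k ∉ st.1 := by
        intro hko
        rw [h1] at hko
        obtain ⟨p, hp, hpe⟩ := List.mem_map.mp hko
        exact hknotkeys (List.mem_map.mpr ⟨p, (List.mem_filter.mp hp).1, hpe⟩)
      have hkmore : k ∉ st.2 := by
        intro hkm
        obtain ⟨v, hvm, _⟩ := (h2 k).mp hkm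
        exact hknotkeys (List.mem_map.mpr ⟨(k, v), hvm, rfl⟩)
      have hcf : d.contains k = false := by simpa using hc
      have hstepA : pvStepA d c = d.insert k 1 := by
        unfold pvStepA
        rw [← hk, if_pos hcons]
        simp only [hcf]
        simp
      have hstepB : pvStepB st c = (PySem.Set.add st.1 k, st.2) := by
        unfold pvStepB
        rw [← hk, if_pos hcons]
        simp only [show PySem.Set.contains st.2 k = false by
            simp [hkmore],
          show PySem.Set.contains st.1 k = false by
            simp [hkonce]]
        simp
      have hitems : (d.insert k 1).items = d.items ++ [(k, (1 : Int))] :=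
        PySem.Dict.items_insert_of_not_contains d 1 hcf
      rw [hstepA, hstepB]
      refine ⟨?_, ?_, PySem.Dict.nodup_keys_insert d k _ h3, ?_⟩
      · rw [PySem.Set.add_of_not_mem hkonce, hitems, List.filter_append, List.map_append, h1]
        simp
      · intro k'
        simp only [h2, hitems, List.mem_append, List.mem_singleton, Prod.mk.injEq]
        constructor
        · rintro ⟨v, hvm, hvne⟩
          exact ⟨v, Or.inl hvm, hvne⟩
        · rintro ⟨v, hvm | ⟨rfl, rfl⟩, hvne⟩
          · exact ⟨v, hvm, hvne⟩
          · exact absurd rfl hvne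
      · intro q hq
        rw [hitems] at hq
        rcases List.mem_append.mp hq with hq' | hq'
        · exact h4 q hq'
        · simp only [List.mem_singleton] at hq'
          simp [hq']
  · simp only [pvStepA, pvStepB, if_neg hcons]
    exact ⟨h1, h2, h3, h4⟩

-- the whole loop preserves the invariant
lemma pv_loop (l : List Char) (d : PySem.Dict Char Int) (st : PySem.Set Char × PySem.Set Char)
    (h : pvInv d st) : pvInv (l.foldl pvStepA d) (l.foldl pvStepB st) := by
  induction l generalizing d st with
  | nil => exact h
  | cons c l ih => exact ih _ _ (pv_step d st c h)

-- ===== VERDICT (by name: the statement is the Claim_ definition above) =====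
theorem unique_consonants_spec : Claim_equal_unique_consonants := by
  intro input_string _
  unfold Spec_unique_consonants unique_consonants unique_consonants_alt
  have hinv : pvInv (input_string.toList.foldl pvStepA PySem.Dict.empty)
      (input_string.toList.foldl pvStepB (PySem.Set.empty, PySem.Set.empty)) :=
    pv_loop _ _ _ ⟨by simp [PySem.Dict.empty], by simp [PySem.Dict.empty], by
      simp [PySem.Dict.empty, PySem.Dict.keys], by simp [PySem.Dict.empty]⟩
  obtain ⟨h1, _, _, _⟩ := hinv
  rw [PySem.List.foldl_count_if (fun count => count == 1) _ 0]
  simp only [PySem.Dict.values, List.countP_map, PySem.Set.len, h1, List.length_map,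
    ← List.countP_eq_length_filter]
  norm_num
  rfl
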